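-- pv_equiv track=rewrite | github.com/19990818/leetcode-python | 2022-11/2022-11-11.py | findValidSplit
-- ===== SOURCE A (Python) =====
-- from typing import List
--
-- from math import gcd
--
-- def findValidSplit(nums: List[int]) -> int:
--     n=len(nums)
--     l=0
--     for i in range(n-1):
--         for j in range(l+1,n):
--             if gcd(nums[i],nums[j])!=1:
--                 l=j
--         if l==i:return l
--     return -1
-- ===== SOURCE B (Python) =====
-- from typing import List
-- from math import gcd
--
-- def findValidSplit(nums: List[int]) -> int:
--     # suffix products: sufs[i] = product of nums[i:]
--     suf = 1
--     sufs = []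
--     for x in reversed(nums):
--         suf *= x
--         sufs.append(suf)
--     sufs.reverse()
--     pre = 1
--     for i in range(len(nums) - 1):
--         pre *= nums[i]
--         if gcd(pre, sufs[i + 1]) == 1:
--             return i
--     return -1
-- ===== Notes on version B (the rewrite author's own statement) =====
-- stated objective: alternative
-- what changed: Replaces A's nested scan (which tracks the furthest index sharing a factor with any earlier element) by a single pass testing gcd(prefix product, suffix product) == 1 at each split, with suffix products precomputed in one backward pass.
import Mathlib
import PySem

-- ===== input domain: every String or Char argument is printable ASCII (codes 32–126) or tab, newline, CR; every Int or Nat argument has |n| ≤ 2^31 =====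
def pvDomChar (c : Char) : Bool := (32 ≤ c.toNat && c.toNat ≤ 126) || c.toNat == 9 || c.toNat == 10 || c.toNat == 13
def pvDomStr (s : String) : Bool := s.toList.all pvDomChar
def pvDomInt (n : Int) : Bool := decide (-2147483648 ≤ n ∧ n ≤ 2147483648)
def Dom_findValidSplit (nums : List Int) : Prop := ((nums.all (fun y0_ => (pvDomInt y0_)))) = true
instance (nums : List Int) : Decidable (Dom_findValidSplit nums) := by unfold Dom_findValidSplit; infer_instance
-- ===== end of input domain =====

-- B replaces A's nested last-hit scan by a different algorithm: coprimality of the prefix product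
-- with the suffix product at each split (exact on Python's arbitrary-precision ints).

-- ===== PORT A =====
-- inner loop 'for j in range(l+1, n): if gcd(nums[i], nums[j]) != 1: l = j'
def pvAInner (nums : List Int) (i : Int) : List Int → Int → Int
  | [], l => l
  | j :: js, l =>
      if Int.gcd (PySem.List.pyGetD nums i 0) (PySem.List.pyGetD nums j 0) ≠ 1
      then pvAInner nums i js j
      else pvAInner nums i js l

-- outer loop 'for i in range(n-1): … ; if l == i: return l'
def pvAOuter (nums : List Int) : List Int → Int → Int
  | [], _ => -1
  | i :: is, l =>
      let l' := pvAInner nums i (PySem.List.pyRange (l + 1) (nums.length : Int) 1) l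
      if l' = i then l' else pvAOuter nums is l'

def findValidSplit (nums : List Int) : Int :=
  pvAOuter nums (PySem.List.pyRange 0 ((nums.length : Int) - 1) 1) 0

-- ===== PORT B =====
-- 'pre *= nums[i]; if gcd(pre, sufs[i+1]) == 1: return i'
def pvBLoop (nums sufs : List Int) : List Int → Int → Int
  | [], _ => -1
  | i :: is, pre =>
      let pre' := pre * PySem.List.pyGetD nums i 0
      if Int.gcd pre' (PySem.List.pyGetD sufs (i + 1) 0) = 1 then i
      else pvBLoop nums sufs is pre'

def findValidSplit_alt (nums : List Int) : Int :=
  -- 'suf = 1; sufs = []; for x in reversed(nums): suf *= x; sufs.append(suf)' then 'sufs.reverse()'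
  let st := nums.reverse.foldl (fun (st : Int × List Int) x => (st.1 * x, st.2 ++ [st.1 * x])) (1, ([] : List Int))
  let sufs := st.2.reverse
  pvBLoop nums sufs (PySem.List.pyRange 0 ((nums.length : Int) - 1) 1) 1

-- ===== PRECONDITION & SPEC =====
def Spec_findValidSplit (nums : List Int) (out : Int) : Prop := out = findValidSplit_alt nums
instance (nums : List Int) (out : Int) : Decidable (Spec_findValidSplit nums out) := by unfold Spec_findValidSplit; infer_instance

-- ===== CLAIM (what is proved, stated in full; the proofs are below) =====
def Claim_equal_findValidSplit : Prop := ∀ (nums : List Int), Dom_findValidSplit nums → Spec_findValidSplit nums (findValidSplit nums)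

-- ===== LEMMAS AND PROOFS =====

-- 'gcd(nums[k], nums[j]) != 1' for Int indices k, j
def pvHit (nums : List Int) (k j : Int) : Prop :=
  Int.gcd (PySem.List.pyGetD nums k 0) (PySem.List.pyGetD nums j 0) ≠ 1

-- some pair with a common factor straddles the split after position i
def pvCross (nums : List Int) (i : Int) : Prop :=
  ∃ k j : Int, 0 ≤ k ∧ k ≤ i ∧ i < j ∧ j < (nums.length : Int) ∧ pvHit nums k j

-- A's inner loop returns its accumulator or a hit from the scanned range
theorem pvAInner_mem (nums : List Int) (i : Int) :
    ∀ (js : List Int) (l : Int),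
      pvAInner nums i js l = l ∨ (pvAInner nums i js l ∈ js ∧ pvHit nums i (pvAInner nums i js l)) := by
  intro js
  induction js with
  | nil => intro l; left; rfl
  | cons j js ih =>
    intro l
    by_cases h : Int.gcd (PySem.List.pyGetD nums i 0) (PySem.List.pyGetD nums j 0) ≠ 1
    · have e : pvAInner nums i (j :: js) l = pvAInner nums i js j := by
        simp [pvAInner, h]
      rw [e]
      rcases ih j with h1 | ⟨h1, h2⟩
      · right; rw [h1]; exact ⟨List.mem_cons_self, h⟩
      · right; exact ⟨List.mem_cons_of_mem _ h1, h2⟩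
    · have e : pvAInner nums i (j :: js) l = pvAInner nums i js l := by
        simp [pvAInner, h]
      rw [e]
      rcases ih l with h1 | ⟨h1, h2⟩
      · left; exact h1
      · right; exact ⟨List.mem_cons_of_mem _ h1, h2⟩

-- A's inner loop never decreases the accumulator (range elements all lie above it)
theorem pvAInner_ge (nums : List Int) (i : Int) :
    ∀ (js : List Int) (l : Int), (∀ j ∈ js, l ≤ j) → l ≤ pvAInner nums i js l := by
  intro js
  induction js with
  | nil => intro l _; exact le_refl l
  | cons j js ih =>
    intro l hall
    by_cases h : Int.gcd (PySem.List.pyGetD nums i 0) (PySem.List.pyGetD nums j 0) ≠ 1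
    · have e : pvAInner nums i (j :: js) l = pvAInner nums i js j := by simp [pvAInner, h]
      rw [e]
      rcases pvAInner_mem nums i js j with h1 | ⟨h1, _⟩
      · rw [h1]; exact hall j List.mem_cons_self
      · exact le_trans (hall _ (List.mem_cons_of_mem _ h1)) (le_refl _)
    · have e : pvAInner nums i (j :: js) l = pvAInner nums i js l := by simp [pvAInner, h]
      rw [e]
      exact ih l (fun j' hj' => hall j' (List.mem_cons_of_mem _ hj'))

-- on a strictly increasing scan, the result bounds every hit in the scanned list
theorem pvAInner_cover (nums : List Int) (i : Int) :
    ∀ (js : List Int) (l : Int), js.Pairwise (· < ·) →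
      ∀ j ∈ js, pvHit nums i j → j ≤ pvAInner nums i js l := by
  intro js
  induction js with
  | nil => intro l _ j hj; exact absurd hj (List.not_mem_nil)
  | cons j js ih =>
    intro l hp j0 hj0 hhit
    have hp' := (List.pairwise_cons.mp hp).2
    have hlt := (List.pairwise_cons.mp hp).1
    rcases List.mem_cons.mp hj0 with rfl | hmem
    · have h : Int.gcd (PySem.List.pyGetD nums i 0) (PySem.List.pyGetD nums j0 0) ≠ 1 := hhit
      have e : pvAInner nums i (j0 :: js) l = pvAInner nums i js j0 := by simp [pvAInner, h]
      rw [e]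
      exact pvAInner_ge nums i js j0 (fun j' hj' => le_of_lt (hlt j' hj'))
    · by_cases h : Int.gcd (PySem.List.pyGetD nums i 0) (PySem.List.pyGetD nums j 0) ≠ 1
      · have e : pvAInner nums i (j :: js) l = pvAInner nums i js j := by simp [pvAInner, h]
        rw [e]; exact ih j hp' j0 hmem hhit
      · have e : pvAInner nums i (j :: js) l = pvAInner nums i js l := by simp [pvAInner, h]
        rw [e]; exact ih l hp' j0 hmem hhit

theorem pv_coprime_prod_left (xs : List Int) (y : Int) :
    Int.gcd xs.prod y = 1 ↔ ∀ x ∈ xs, Int.gcd x y = 1 := by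
  induction xs with
  | nil => simp [Int.gcd]
  | cons x xs ih =>
    simp only [List.prod_cons, List.mem_cons, forall_eq_or_imp]
    constructor
    · intro h
      have h' : Nat.Coprime ((x * xs.prod).natAbs) y.natAbs := h
      rw [Int.natAbs_mul] at h'
      rcases Nat.coprime_mul_iff_left.mp h' with ⟨h1, h2⟩
      exact ⟨h1, ih.mp h2⟩
    · rintro ⟨h1, h2⟩
      have h2' := ih.mpr h2
      show Nat.Coprime ((x * xs.prod).natAbs) y.natAbs
      rw [Int.natAbs_mul]
      exact Nat.coprime_mul_iff_left.mpr ⟨h1, h2'⟩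

theorem pv_coprime_prod_right (x : Int) (ys : List Int) :
    Int.gcd x ys.prod = 1 ↔ ∀ y ∈ ys, Int.gcd x y = 1 := by
  rw [Int.gcd_comm, pv_coprime_prod_left]
  constructor <;> intro h y hy
  · rw [Int.gcd_comm]; exact h y hy
  · rw [Int.gcd_comm]; exact h y hy

-- B's product test at split i is exactly 'no crossing pair at i'
theorem pv_bridge (nums : List Int) (i : Int) (h0 : 0 ≤ i) (h1 : i < (nums.length : Int) - 1) :
    (Int.gcd ((nums.take (i.toNat + 1)).prod) ((nums.drop (i.toNat + 1)).prod) = 1) ↔ ¬ pvCross nums i := by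
  set m := i.toNat + 1 with hm
  have hmn : m < nums.length := by omega
  rw [pv_coprime_prod_left]
  constructor
  · intro h hc
    rcases hc with ⟨k, j, hk0, hki, hij, hjn, hhit⟩
    have hkn : k.toNat < nums.length := by omega
    have hjn' : j.toNat < nums.length := by omega
    have hxmem : nums[k.toNat] ∈ nums.take m := by
      have hkm : k.toNat < (nums.take m).length := by simp; omega
      have : (nums.take m)[k.toNat] = nums[k.toNat] := List.getElem_take
      rw [← this]; exact List.getElem_mem hkm
    have hymem : nums[j.toNat] ∈ nums.drop m := by
      have ht : j.toNat - m < (nums.drop m).length := by simp; omega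
      refine List.mem_iff_getElem.mpr ⟨j.toNat - m, ht, ?_⟩
      rw [List.getElem_drop]
      congr 1
      omega
    have := (pv_coprime_prod_right _ _).mp (h _ hxmem) _ hymem
    apply hhit
    rw [PySem.List.pyGetD_eq_getElem nums 0 hk0 (by omega), PySem.List.pyGetD_eq_getElem nums 0 (by omega) (by omega)]
    exact this
  · intro hnc x hx
    rw [pv_coprime_prod_right]
    intro y hy
    by_contra hne
    rcases List.mem_iff_getElem.mp hx with ⟨kn, hkn, hxe⟩
    rcases List.mem_iff_getElem.mp hy with ⟨t, ht, hye⟩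
    have hkn' : kn < m := by simp at hkn; omega
    have hknn : kn < nums.length := by omega
    have htn : m + t < nums.length := by simp at ht; omega
    apply hnc
    refine ⟨(kn : Int), ((m + t : Nat) : Int), by positivity, by omega, by push_cast; omega, by exact_mod_cast htn, ?_⟩
    unfold pvHit
    rw [PySem.List.pyGetD_eq_getElem nums 0 (by positivity) (by omega),
        PySem.List.pyGetD_eq_getElem nums 0 (by positivity) (by omega)]
    simp only [Int.toNat_natCast]
    have e1 : nums[kn]'hknn = x := by
      rw [← hxe]; simp [List.getElem_take]
    have e2 : nums[m + t]'htn = y := by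
      rw [← hye]; rw [List.getElem_drop]
    rw [e1, e2]
    exact hne

-- the append-fold of B collects running prefix products of its input
theorem pv_fold2 : ∀ (ys : List Int) (s : Int) (acc : List Int),
    (ys.foldl (fun (st : Int × List Int) x => (st.1 * x, st.2 ++ [st.1 * x])) (s, acc)).2
      = acc ++ (List.range ys.length).map (fun t => s * (ys.take (t + 1)).prod) := by
  intro ys
  induction ys with
  | nil => intro s acc; simp
  | cons x xs ih =>
    intro s acc
    simp only [List.foldl_cons]
    rw [ih (s * x) (acc ++ [s * x])]
    rw [List.length_cons, List.range_succ_eq_map]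
    simp [List.map_map, Function.comp, mul_assoc]

-- B's reversed list of reverse-prefix products holds the suffix products
theorem pv_sufs (nums : List Int) :
    ∀ m : Nat, m < nums.length →
      PySem.List.pyGetD ((nums.reverse.foldl (fun (st : Int × List Int) x => (st.1 * x, st.2 ++ [st.1 * x])) (1, ([] : List Int))).2.reverse) (m : Int) 0
        = (nums.drop m).prod := by
  intro m hm
  rw [pv_fold2]
  rw [PySem.List.pyGetD_natCast]
  rw [List.getD_eq_getElem _ _ (by simpa using hm)]
  rw [List.getElem_reverse]
  simp only [List.nil_append, List.getElem_map, List.getElem_range, List.length_map, List.length_range, List.length_reverse, one_mul]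
  have h1 : nums.length - 1 - m + 1 = nums.length - m := by omega
  rw [h1]
  rw [List.take_reverse]
  rw [List.prod_reverse]
  congr 2
  omega

-- main loop invariant: A's scan state l bounds all hits of earlier rows, and is itself a hit
theorem pv_main (nums sufs : List Int)
    (hsufs : ∀ m : Nat, m < nums.length → PySem.List.pyGetD sufs (m : Int) 0 = (nums.drop m).prod) :
    ∀ d : Nat, ∀ i l : Int,
      (nums.length : Int) - 1 - i ≤ (d : Int) →
      0 ≤ i → i ≤ l → l < (nums.length : Int) →
      (∀ k j : Int, 0 ≤ k → k < i → k < j → j < (nums.length : Int) → pvHit nums k j → j ≤ l) →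
      (l = i ∨ ∃ k : Int, 0 ≤ k ∧ k < i ∧ k < l ∧ pvHit nums k l) →
      pvAOuter nums (PySem.List.pyRange i ((nums.length : Int) - 1) 1) l
        = pvBLoop nums sufs (PySem.List.pyRange i ((nums.length : Int) - 1) 1) ((nums.take i.toNat).prod) := by
  intro d
  induction d with
  | zero =>
    intro i l hd h0 hil hln hb hc
    have hni : (nums.length : Int) - 1 ≤ i := by omega
    rw [PySem.List.pyRange_one_eq_nil hni]
    rfl
  | succ d ih =>
    intro i l hd h0 hil hln hb hc
    by_cases hni : (nums.length : Int) - 1 ≤ i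
    · rw [PySem.List.pyRange_one_eq_nil hni]; rfl
    · have hin : i < (nums.length : Int) - 1 := by omega
      rw [PySem.List.pyRange_one_cons (by omega : i < (nums.length : Int) - 1)]
      set n : Int := (nums.length : Int) with hn
      set l' := pvAInner nums i (PySem.List.pyRange (l + 1) n 1) l with hl'
      have hge : l ≤ l' := by
        apply pvAInner_ge
        intro j hj
        have := (PySem.List.mem_pyRange_one.mp hj).1
        omega
      have hmem := pvAInner_mem nums i (PySem.List.pyRange (l + 1) n 1) l
      have hcover : ∀ j : Int, l < j → j < n → pvHit nums i j → j ≤ l' := by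
        intro j hlj hjn hhit
        exact pvAInner_cover nums i _ l (PySem.List.pairwise_lt_pyRange_one _ _)
          j (PySem.List.mem_pyRange_one.mpr ⟨by omega, hjn⟩) hhit
      have hl'n : l' < n := by
        rcases hmem with h | ⟨h, _⟩
        · rw [← hl'] at h; omega
        · have := (PySem.List.mem_pyRange_one.mp h).2; omega
      have hpre' : (nums.take i.toNat).prod * PySem.List.pyGetD nums i 0 = (nums.take (i.toNat + 1)).prod := by
        rw [PySem.List.pyGetD_eq_getElem nums 0 h0 (by omega)]
        rw [List.prod_take_succ nums i.toNat (by omega)]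
      have hsuf : PySem.List.pyGetD sufs (i + 1) 0 = (nums.drop (i.toNat + 1)).prod := by
        have e : i + 1 = ((i.toNat + 1 : Nat) : Int) := by omega
        rw [e, hsufs (i.toNat + 1) (by omega)]
      have hiff : l' = i ↔ ¬ pvCross nums i := by
        constructor
        · intro he hcr
          have hli : l = i := by omega
          rcases hcr with ⟨k, j, hk0, hki, hij, hjn, hhit⟩
          rcases lt_or_eq_of_le hki with hki' | rfl
          · have := hb k j hk0 hki' (by omega) hjn hhit
            omega
          · have := hcover j (by omega) hjn hhit
            omega
        · intro hnc
          by_contra hne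
          have hl'i : i < l' := by omega
          rcases hmem with h | ⟨h, hhit⟩
          · rw [← hl'] at h
            have hli : i < l := by omega
            rcases hc with rfl | ⟨k, hk0, hki, hkl, hhit⟩
            · omega
            · exact hnc ⟨k, l, hk0, by omega, hli, hln, hhit⟩
          · exact hnc ⟨i, l', h0, le_refl i, hl'i, hl'n, hhit⟩
      show (if l' = i then l' else pvAOuter nums (PySem.List.pyRange (i + 1) (n - 1) 1) l')
          = (if Int.gcd ((nums.take i.toNat).prod * PySem.List.pyGetD nums i 0) (PySem.List.pyGetD sufs (i + 1) 0) = 1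
             then i
             else pvBLoop nums sufs (PySem.List.pyRange (i + 1) (n - 1) 1) ((nums.take i.toNat).prod * PySem.List.pyGetD nums i 0))
      rw [hpre', hsuf]
      by_cases he : l' = i
      · rw [if_pos he, if_pos ((pv_bridge nums i h0 hin).mpr (hiff.mp he)), he]
      · have hcr : pvCross nums i := by
          by_contra hnc
          exact he (hiff.mpr hnc)
        rw [if_neg he, if_neg (by rw [pv_bridge nums i h0 hin]; exact fun hnc => hnc hcr)]
        have hl'i : i < l' := by omega
        have epre : (nums.take (i.toNat + 1)).prod = (nums.take (i + 1).toNat).prod := by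
          congr 2
          omega
        rw [epre]
        apply ih (i + 1) l' (by omega) (by omega) (by omega) hl'n
        · intro k j hk0 hki hkj hjn hhit
          rcases lt_or_eq_of_le (by omega : k ≤ i) with hki' | rfl
          · have := hb k j hk0 hki' hkj hjn hhit
            omega
          · by_cases hjl : j ≤ l
            · omega
            · exact hcover j (by omega) hjn hhit
        · rcases hmem with h | ⟨h, hhit⟩
          · rw [← hl'] at h
            rcases hc with heq | ⟨k, hk0, hki, hkl, hhit⟩
            · omega
            · right; exact ⟨k, hk0, by omega, by omega, by rw [h]; exact hhit⟩
          · right; exact ⟨i, h0, by omega, hl'i, hhit⟩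

-- ===== VERDICT (by name: the statement is the Claim_ definition above) =====
theorem findValidSplit_spec : Claim_equal_findValidSplit := by
  intro nums _
  show findValidSplit nums = findValidSplit_alt nums
  show pvAOuter nums (PySem.List.pyRange 0 ((nums.length : Int) - 1) 1) 0
      = pvBLoop nums
          ((nums.reverse.foldl (fun (st : Int × List Int) x => (st.1 * x, st.2 ++ [st.1 * x])) (1, ([] : List Int))).2.reverse)
          (PySem.List.pyRange 0 ((nums.length : Int) - 1) 1) 1
  rcases Nat.eq_zero_or_pos nums.length with hz | hpos
  · rw [List.eq_nil_of_length_eq_zero hz]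
    rfl
  · have h1 : (1 : Int) = (nums.take (0 : Int).toNat).prod := by simp
    rw [h1]
    apply pv_main nums _ (pv_sufs nums) nums.length 0 0 (by omega) (by omega) (by omega) (by exact_mod_cast hpos)
    · intro k j hk0 hki _ _ _
      omega
    · left; rfl
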